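-- pv_equiv track=rewrite | github.com/MrBrantCode/unitest_baseline | mut_generate/mist_train_cf/cf_92082/solution.py | insert_character
-- ===== SOURCE A (Python) =====
-- def insert_character(string, character):
--     def is_prime(n):
--         if n <= 1:
--             return False
--         for i in range(2, int(n**0.5) + 1):
--             if n % i == 0:
--                 return False
--         return True
--
--     prime_indexes = [i for i in range(len(string)) if is_prime(i)]
--     for index in prime_indexes:
--         string = string[:index] + character + string[index:]
--     return string
-- ===== SOURCE B (Python) =====
-- def insert_character(string, character):
--     n = len(string)
--     # sieve of Eratosthenes (unconditional marking): sieve[i] == is_prime(i) for i < n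
--     sieve = [i >= 2 for i in range(n)]
--     for i in range(2, n):
--         if i * i < n:
--             sieve[i * i::i] = [False] * ((n - i * i + i - 1) // i)
--     # gap buffer: left = chars before the cursor, right = chars after it (last = next char)
--     left = []
--     right = list(string)[::-1]
--     cur = 0
--     L = len(character)
--     clist = list(character)
--     for p in range(n):
--         if sieve[p]:
--             if cur < p:
--                 k = p - cur
--                 chunk = right[len(right) - k:]
--                 del right[len(right) - k:]
--                 chunk.reverse()
--                 left += chunk
--             elif cur > p:
--                 k = cur - p
--                 chunk = left[len(left) - k:]
--                 del left[len(left) - k:]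
--                 chunk.reverse()
--                 right += chunk
--             left += clist
--             cur = p + L
--     return ''.join(left) + ''.join(reversed(right))
-- ===== Notes on version B (the rewrite author's own statement) =====
-- stated objective: faster
-- what changed: Replaces per-index trial-division primality plus repeated full-string slicing/concatenation with a sieve of Eratosthenes computed once and a single left-to-right gap-buffer (zipper) pass that performs all insertions without rebuilding the string.
import Mathlib
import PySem

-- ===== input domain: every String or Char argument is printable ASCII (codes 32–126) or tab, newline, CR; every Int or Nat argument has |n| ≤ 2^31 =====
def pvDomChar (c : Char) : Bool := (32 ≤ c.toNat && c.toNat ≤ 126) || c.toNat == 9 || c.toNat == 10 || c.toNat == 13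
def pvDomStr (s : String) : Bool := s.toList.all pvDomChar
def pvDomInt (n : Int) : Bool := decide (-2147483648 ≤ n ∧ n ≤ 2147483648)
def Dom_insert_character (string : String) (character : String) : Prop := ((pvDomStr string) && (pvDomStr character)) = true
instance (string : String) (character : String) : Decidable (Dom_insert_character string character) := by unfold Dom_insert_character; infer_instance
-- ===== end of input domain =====

-- B replaces A's trial-division tests and repeated full-string slicing by one sieve of
-- Eratosthenes and one gap-buffer (zipper) pass (objective: faster; measured).

-- ===== PORT A =====
-- is_prime: `int(n**0.5)` ported as Nat.sqrt (exact for these index magnitudes);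
-- the for-loop with early `return False` is `List.all`.
def pvIsPrime (n : Nat) : Bool :=
  if n ≤ 1 then false
  else (List.range' 2 (Nat.sqrt n + 1 - 2)).all (fun i => !(n % i == 0))

-- `string[:index] + character + string[index:]` on a 0 ≤ index: Python slices clamp at the
-- length exactly like List.take / List.drop, so take/drop is an exact port.
def insert_character (string : String) (character : String) : String :=
  let s := string.toList
  let c := character.toList
  let primeIndexes := (List.range s.length).filter (fun i => pvIsPrime i)
  String.mk (primeIndexes.foldl (fun t idx => t.take idx ++ c ++ t.drop idx) s)

-- ===== PORT B =====
-- sieve: `range(i*i, n, i)` over naturals is List.range' (i*i) ⌈(n-i*i)/i⌉ i; the slice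
-- assignment `sieve[i*i::i] = [False]*…` sets exactly those positions, ported element-wise.
def pvSieve (n : Nat) : List Bool :=
  (List.range' 2 (n - 2)).foldl
    (fun s i =>
      if i * i < n then
        (List.range' (i * i) ((n - i * i + i - 1) / i) i).foldl (fun s j => s.set j false) s
      else s)
    ((List.range n).map (fun i => decide (2 ≤ i)))

-- body of `for p in range(n)`: move the cursor to p by a chunk transfer between the two
-- buffers, then `left += clist` and `cur = p + L`.  The Lean `l` (resp. `r`) holds the chars
-- before the cursor nearest-first (resp. after the cursor, in order), i.e. exactly Python's
-- `left` (resp. `right`) reversed; Python's chunk slice/delete/reverse/extend of k elements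
-- is the take/drop/reverse transfer of the same k chars.
def pvStep (sieve : List Bool) (c : List Char) (st : List Char × List Char × Nat) (p : Nat) :
    List Char × List Char × Nat :=
  if sieve.getD p false then
    let (l, r, cur) := st
    let (l', r') :=
      if cur < p then ((r.take (p - cur)).reverse ++ l, r.drop (p - cur))
      else if p < cur then (l.drop (cur - p), (l.take (cur - p)).reverse ++ r)
      else (l, r)
    (c.reverse ++ l', r', p + c.length)
  else st

def insert_character_alt (string : String) (character : String) : String :=
  let s := string.toList
  let n := s.length
  let sieve := pvSieve n
  let c := character.toList
  let fin := (List.range n).foldl (pvStep sieve c) (([] : List Char), s, 0)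
  String.mk (fin.1.reverse ++ fin.2.1)

-- ===== PRECONDITION & SPEC =====
def Spec_insert_character (string : String) (character : String) (out : String) : Prop := out = insert_character_alt string character
instance (string : String) (character : String) (out : String) : Decidable (Spec_insert_character string character out) := by unfold Spec_insert_character; infer_instance

-- ===== CLAIM (what is proved, stated in full; the proofs are below) =====
def Claim_equal_insert_character : Prop := ∀ (string : String) (character : String), Dom_insert_character string character → Spec_insert_character string character (insert_character string character)

-- ===== LEMMAS AND PROOFS =====

theorem pvIsPrime_eq (k : Nat) : pvIsPrime k = decide (Nat.Prime k) := by
  unfold pvIsPrime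
  by_cases hk : k ≤ 1
  · rw [if_pos hk]
    have : ¬ Nat.Prime k := fun hp => absurd hp.two_le (by omega)
    simp [this]
  · rw [if_neg hk]
    cases h : decide (Nat.Prime k)
    · simp only [decide_eq_false_iff_not] at h
      rw [Bool.eq_false_iff]
      intro hall
      rw [List.all_eq_true] at hall
      apply h
      rw [Nat.prime_def_le_sqrt]
      refine ⟨by omega, fun m h2m hms hdvd => ?_⟩
      have hmem : m ∈ List.range' 2 (Nat.sqrt k + 1 - 2) := by
        rw [List.mem_range']
        exact ⟨m - 2, by omega, by omega⟩
      have := hall m hmem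
      rw [Nat.dvd_iff_mod_eq_zero.mp hdvd] at this
      simp at this
    · simp only [decide_eq_true_eq] at h
      rw [List.all_eq_true]
      intro i hi
      rw [List.mem_range'] at hi
      obtain ⟨t, ht, rfl⟩ := hi
      have h2 : 2 ≤ 2 + 1 * t := by omega
      have hle : 2 + 1 * t ≤ Nat.sqrt k := by omega
      have hnd := (Nat.prime_def_le_sqrt.mp h).2 _ h2 hle
      simp only [Bool.not_eq_eq_eq_not, Bool.not_true, beq_eq_false_iff_ne]
      intro hmod
      exact hnd (Nat.dvd_iff_mod_eq_zero.mpr hmod)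

theorem foldl_set_false_getD (js : List Nat) (s : List Bool) (k : Nat) :
    (js.foldl (fun s j => s.set j false) s).getD k false
      = (s.getD k false && !js.contains k) := by
  induction js generalizing s with
  | nil => simp
  | cons j js ih =>
    have hset : (s.set j false).getD k false = (s.getD k false && !(k == j)) := by
      by_cases hjk : j = k
      · subst hjk
        by_cases hlen : j < s.length
        · simp [List.getD, List.getElem?_set_self hlen]
        · have h1 : (s.set j false)[j]? = none := List.getElem?_eq_none (by simpa using hlen)
          have h2 : s[j]? = none := List.getElem?_eq_none (by omega)
          simp [List.getD, h1, h2]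
      · simp [List.getD, List.getElem?_set_ne hjk]
        exact fun _ h => hjk h.symm
    rw [List.foldl_cons, ih, hset, List.contains_cons, Bool.not_or, ← Bool.and_assoc]

theorem foldl_sieve_getD (is : List Nat) (R : Nat → List Nat) (s : List Bool) (k : Nat) :
    (is.foldl (fun s i => (R i).foldl (fun s j => s.set j false) s) s).getD k false
      = (s.getD k false && is.all (fun i => !(R i).contains k)) := by
  induction is generalizing s with
  | nil => simp
  | cons i is ih =>
    rw [List.foldl_cons, ih, foldl_set_false_getD, List.all_cons, Bool.and_assoc]

theorem foldl_congr_of_mem {α β : Type} (l : List α) (f g : β → α → β)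
    (h : ∀ a ∈ l, ∀ x, f x a = g x a) : ∀ b : β, l.foldl f b = l.foldl g b := by
  induction l with
  | nil => intro b; rfl
  | cons a l ih =>
    intro b
    rw [List.foldl_cons, List.foldl_cons, h a (by simp)]
    exact ih (fun x hx y => h x (by simp [hx]) y) _

-- the `if i*i < n` guard only skips empty marking ranges
theorem pvSieve_unguard (n : Nat) :
    pvSieve n = (List.range' 2 (n - 2)).foldl
      (fun s i =>
        (List.range' (i * i) ((n - i * i + i - 1) / i) i).foldl (fun s j => s.set j false) s)
      ((List.range n).map (fun i => decide (2 ≤ i))) := by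
  unfold pvSieve
  apply foldl_congr_of_mem
  intro i hi s
  rw [List.mem_range'] at hi
  obtain ⟨t, ht, rfl⟩ := hi
  split
  · rfl
  · have hcnt : (n - (2 + 1 * t) * (2 + 1 * t) + (2 + 1 * t) - 1) / (2 + 1 * t) = 0 := by
      apply Nat.div_eq_of_lt
      omega
    rw [hcnt]
    rfl
theorem pvSieve_getD (n k : Nat) (hk : k < n) :
    (pvSieve n).getD k false = pvIsPrime k := by
  rw [pvSieve_unguard, foldl_sieve_getD, pvIsPrime_eq]
  have hinit : ((List.range n).map (fun i => decide (2 ≤ i))).getD k false = decide (2 ≤ k) := by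
    simp [List.getD, List.getElem?_map, List.getElem?_range hk]
  rw [hinit]
  cases h : decide (Nat.Prime k)
  · -- k not prime: either k < 2, or some prime factor marks it
    simp only [decide_eq_false_iff_not] at h
    by_cases h2 : 2 ≤ k
    · rw [Bool.eq_false_iff]
      intro htrue
      rw [Bool.and_eq_true, List.all_eq_true] at htrue
      obtain ⟨-, hall⟩ := htrue
      obtain ⟨m, hmp, hmdvd, hmm⟩ : ∃ m, Nat.Prime m ∧ m ∣ k ∧ m * m ≤ k := by
        have hk1 : k ≠ 1 := by omega
        refine ⟨k.minFac, Nat.minFac_prime hk1, Nat.minFac_dvd k, ?_⟩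
        have := Nat.minFac_sq_le_self (by omega) (fun hp => h hp)
        simpa [pow_two] using this
      have hm2 : 2 ≤ m := hmp.two_le
      have hmlek : m ≤ k := Nat.le_of_dvd (by omega) hmdvd
      have hmn : m < n := by
        have hmk : m < k := by nlinarith
        omega
      have hmem : m ∈ List.range' 2 (n - 2) := by
        rw [List.mem_range']; exact ⟨m - 2, by omega, by omega⟩
      have hnc := hall m hmem
      rw [Bool.not_eq_eq_eq_not, Bool.not_true, Bool.eq_false_iff] at hnc
      apply hnc
      rw [List.contains_eq_any_beq, List.any_eq_true]
      obtain ⟨t, rfl⟩ := hmdvd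
      have htm : m ≤ t := by nlinarith
      refine ⟨m * t, List.mem_range'.mpr ⟨t - m, ?_,
        by rw [← Nat.mul_add, Nat.add_sub_cancel' htm]⟩, by simp⟩
      rw [Nat.lt_iff_add_one_le, Nat.le_div_iff_mul_le (by omega : 0 < m)]
      have hexp : (t - m + 1) * m = m * t - m * m + m := by
        rw [Nat.add_mul, Nat.sub_mul, Nat.one_mul, Nat.mul_comm t m]
      rw [hexp]
      omega
    · have : decide (2 ≤ k) = false := by simp; omega
      rw [this, Bool.false_and]
  · -- k prime: 2 ≤ k and no range'(i*i, ·, i) contains k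
    simp only [decide_eq_true_eq] at h
    have h2 : decide (2 ≤ k) = true := by simp [h.two_le]
    rw [h2, Bool.true_and, List.all_eq_true]
    intro i hi
    rw [List.mem_range'] at hi
    obtain ⟨t, ht, rfl⟩ := hi
    rw [Bool.not_eq_eq_eq_not, Bool.not_true, Bool.eq_false_iff]
    intro hc
    rw [List.contains_eq_any_beq, List.any_eq_true] at hc
    obtain ⟨x, hx, hbeq⟩ := hc
    rw [List.mem_range'] at hx
    obtain ⟨u, hu, rfl⟩ := hx
    set i := 2 + 1 * t with hidef
    have hxk : i * i + i * u = k := by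
      have := eq_of_beq hbeq
      omega
    have hdvd : i ∣ k := ⟨i + u, by rw [← hxk]; ring⟩
    have hik : i < k := by nlinarith
    have : i = 1 ∨ i = k := Nat.Prime.eq_one_or_self_of_dvd h i hdvd
    omega

-- the insertion step without the sieve test (used once the guarded fold is filtered)
def pvIns (c : List Char) (st : List Char × List Char × Nat) (p : Nat) :
    List Char × List Char × Nat :=
  let (l, r, cur) := st
  let (l', r') :=
    if cur < p then ((r.take (p - cur)).reverse ++ l, r.drop (p - cur))
    else if p < cur then (l.drop (cur - p), (l.take (cur - p)).reverse ++ r)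
    else (l, r)
  (c.reverse ++ l', r', p + c.length)

theorem pvStep_eq_ite (sieve : List Bool) (c : List Char) (st : List Char × List Char × Nat)
    (p : Nat) : pvStep sieve c st p = if sieve.getD p false then pvIns c st p else st := by
  unfold pvStep pvIns
  split <;> rfl

theorem gap_run (c : List Char) (ps : List Nat) :
    ∀ (l r : List Char), (∀ p ∈ ps, p ≤ l.length + r.length) →
    ((ps.foldl (pvIns c) (l, r, l.length)).1.reverse ++ (ps.foldl (pvIns c) (l, r, l.length)).2.1
      = ps.foldl (fun t idx => t.take idx ++ c ++ t.drop idx) (l.reverse ++ r)) := by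
  induction ps with
  | nil => intro l r _; simp
  | cons p ps ih =>
    intro l r hp
    have hptot : p ≤ l.length + r.length := hp p (by simp)
    -- the buffers after the chunk transfer that moves the cursor to p
    set mv : List Char × List Char :=
      if l.length < p then ((r.take (p - l.length)).reverse ++ l, r.drop (p - l.length))
      else if p < l.length then (l.drop (l.length - p), (l.take (l.length - p)).reverse ++ r)
      else (l, r)
      with hmv
    have hspec : mv.1.reverse ++ mv.2 = l.reverse ++ r ∧ mv.1.length = p := by
      by_cases hf : l.length < p
      · rw [hmv, if_pos hf]
        constructor
        · simp only [List.reverse_append, List.reverse_reverse, List.append_assoc,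
            List.take_append_drop]
        · simp only [List.length_append, List.length_reverse, List.length_take]
          omega
      · by_cases hb : p < l.length
        · rw [hmv, if_neg hf, if_pos hb]
          constructor
          · have : (l.take (l.length - p) ++ l.drop (l.length - p)).reverse ++ r
                = l.reverse ++ r := by rw [List.take_append_drop]
            rw [← this, List.reverse_append, List.append_assoc]
          · simp only [List.length_drop]; omega
        · rw [hmv, if_neg hf, if_neg hb]
          exact ⟨rfl, by show l.length = p; omega⟩
    have hstep : pvIns c (l, r, l.length) p = (c.reverse ++ mv.1, mv.2, p + c.length) := by
      unfold pvIns
      simp only [← hmv]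
    have hlen2 : (c.reverse ++ mv.1).length = p + c.length := by
      rw [List.length_append, List.length_reverse, hspec.2]; omega
    have htot : mv.1.length + mv.2.length = l.length + r.length := by
      have := congrArg List.length hspec.1
      simpa using this
    rw [List.foldl_cons, List.foldl_cons, hstep]
    have hih := ih (c.reverse ++ mv.1) mv.2
      (by intro q hq
          have := hp q (List.mem_cons_of_mem _ hq)
          rw [hlen2]; omega)
    rw [hlen2] at hih
    rw [hih]
    congr 1
    have hrl : mv.1.reverse.length = p := by rw [List.length_reverse]; exact hspec.2
    have htake : (l.reverse ++ r).take p = mv.1.reverse := by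
      rw [← hspec.1, List.take_left' hrl]
    have hdrop : (l.reverse ++ r).drop p = mv.2 := by
      rw [← hspec.1, List.drop_left' hrl]
    rw [htake, hdrop, List.reverse_append, List.reverse_reverse]

-- ===== VERDICT (by name: the statement is the Claim_ definition above) =====
theorem insert_character_spec : Claim_equal_insert_character := by
  intro string character _
  unfold Spec_insert_character insert_character insert_character_alt
  dsimp only
  set s := string.toList with hs
  set c := character.toList with hc
  have hstep : pvStep (pvSieve s.length) c
      = fun st p => if (pvSieve s.length).getD p false then pvIns c st p else st := by
    funext st p; exact pvStep_eq_ite _ _ _ _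
  rw [hstep, ← List.foldl_filter]
  have hfeq : (List.range s.length).filter (fun p => (pvSieve s.length).getD p false)
      = (List.range s.length).filter (fun i => pvIsPrime i) := by
    apply List.filter_congr
    intro p hp
    rw [pvSieve_getD s.length p (List.mem_range.mp hp)]
  rw [hfeq]
  have hrun := gap_run c ((List.range s.length).filter (fun i => pvIsPrime i)) [] s
    (by intro p hp
        have := List.mem_range.mp (List.mem_of_mem_filter hp)
        simp; omega)
  simp only [List.reverse_nil, List.nil_append, List.length_nil] at hrun
  rw [hrun]
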